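-- pv_equiv track=rewrite | github.com/Minecraftian14/dl-gen-lyrics | src/aspect_cobalt/inference/generator.py | _truncate_to_n_newlines
-- ===== SOURCE A (Python) =====
-- from typing import Dict, List, Optional, Tuple
--
-- def _truncate_to_n_newlines(
--     token_ids:  List[int],
--     nl_id:      int,
--     n:          int,
-- ) -> List[int]:
--     count = 0
--     for i, tid in enumerate(token_ids):
--         if tid == nl_id:
--             count += 1
--             if count >= n:
--                 return token_ids[: i + 1]
--     return token_ids
-- ===== SOURCE B (Python) =====
-- from typing import Dict, List, Optional, Tuple
--
-- def _truncate_to_n_newlines(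
--     token_ids:  List[int],
--     nl_id:      int,
--     n:          int,
-- ) -> List[int]:
--     positions = [i for i, tid in enumerate(token_ids) if tid == nl_id]
--     k = n if n > 1 else 1
--     if len(positions) >= k:
--         return token_ids[: positions[k - 1] + 1]
--     return token_ids
-- ===== Notes on version B (the rewrite author's own statement) =====
-- stated objective: alternative
-- what changed: Replaces the early-exit counting scan with a build-the-newline-index-then-single-lookup decomposition: collect all newline positions, clamp the target to max(n,1), and slice at the k-th position if it exists.
import Mathlib
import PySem

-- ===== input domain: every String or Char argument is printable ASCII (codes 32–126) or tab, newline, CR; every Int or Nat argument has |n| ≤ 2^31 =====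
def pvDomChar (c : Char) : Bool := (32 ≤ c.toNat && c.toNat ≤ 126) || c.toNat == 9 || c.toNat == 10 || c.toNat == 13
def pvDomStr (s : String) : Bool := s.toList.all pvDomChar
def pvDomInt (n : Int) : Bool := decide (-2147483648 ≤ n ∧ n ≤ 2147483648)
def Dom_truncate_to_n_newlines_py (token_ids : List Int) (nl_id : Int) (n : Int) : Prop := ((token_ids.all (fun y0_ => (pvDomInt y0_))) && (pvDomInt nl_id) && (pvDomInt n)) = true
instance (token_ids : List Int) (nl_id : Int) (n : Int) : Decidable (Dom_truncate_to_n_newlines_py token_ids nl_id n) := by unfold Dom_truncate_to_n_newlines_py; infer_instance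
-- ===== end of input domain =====

-- B replaces A's early-exit counting scan by building the full list of newline positions
-- and cutting at the max(n,1)-th one if present (objective: alternative decomposition).

-- ===== PORT A =====
-- the 'for i, tid in enumerate(token_ids)' loop with accumulator 'count'
def truncAGo (all : List Int) (nl_id : Int) (n : Int) : List (Int × Int) → Int → List Int
  | [], _ => all
  | (i, tid) :: rest, count =>
    if tid = nl_id then
      if count + 1 ≥ n then PySem.List.slice all none (some (i + 1))
      else truncAGo all nl_id n rest (count + 1)
    else truncAGo all nl_id n rest count

def truncate_to_n_newlines_py (token_ids : List Int) (nl_id : Int) (n : Int) : List Int :=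
  truncAGo token_ids nl_id n (PySem.List.enumerate token_ids 0) 0

-- ===== PORT B =====
def truncate_to_n_newlines_py_alt (token_ids : List Int) (nl_id : Int) (n : Int) : List Int :=
  let positions : List Int :=
    ((PySem.List.enumerate token_ids 0).filter (fun p => p.2 == nl_id)).map (·.1)
  let k : Int := if n > 1 then n else 1
  if (positions.length : Int) ≥ k then
    -- positions[k-1] is in range under the guard (k ≥ 1), so getD's default is never used
    PySem.List.slice token_ids none (some (positions.getD (k - 1).toNat 0 + 1))
  else token_ids

-- ===== PRECONDITION & SPEC =====
def Spec_truncate_to_n_newlines_py (token_ids : List Int) (nl_id : Int) (n : Int) (out : List Int) : Prop := out = truncate_to_n_newlines_py_alt token_ids nl_id n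
instance (token_ids : List Int) (nl_id : Int) (n : Int) (out : List Int) : Decidable (Spec_truncate_to_n_newlines_py token_ids nl_id n out) := by unfold Spec_truncate_to_n_newlines_py; infer_instance

-- ===== CLAIM (what is proved, stated in full; the proofs are below) =====
def Claim_equal_truncate_to_n_newlines_py : Prop := ∀ (token_ids : List Int) (nl_id : Int) (n : Int), Dom_truncate_to_n_newlines_py token_ids nl_id n → Spec_truncate_to_n_newlines_py token_ids nl_id n (truncate_to_n_newlines_py token_ids nl_id n)

-- ===== LEMMAS AND PROOFS =====

-- common reference function: cut just after the first newline at which the remaining target m has dropped to ≤ 1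
def fTr (nl : Int) : List Int → Int → List Int
  | [], _ => []
  | t :: rest, m =>
    if t = nl then (if m ≤ 1 then [t] else t :: fTr nl rest (m - 1))
    else t :: fTr nl rest m

theorem truncAGo_eq (nl n : Int) (rest p : List Int) (count : Int) :
    truncAGo (p ++ rest) nl n (PySem.List.enumerate rest (p.length : Int)) count
      = p ++ fTr nl rest (n - count) := by
  induction rest generalizing p count with
  | nil => simp [PySem.List.enumerate, truncAGo, fTr]
  | cons t rest ih =>
    rw [PySem.List.enumerate_cons]
    by_cases ht : t = nl
    · subst ht
      by_cases hc : count + 1 ≥ n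
      · have h1 : ((p.length : Int) + 1) = ((p.length + 1 : Nat) : Int) := by push_cast; ring
        simp only [truncAGo, if_pos hc, h1, PySem.List.slice_to_natCast]
        have hm : n - count ≤ 1 := by omega
        simp [fTr, hm, List.take_append]
      · have h1 : ((p.length : Int) + 1) = (((p ++ [t]).length : Nat) : Int) := by
          simp
        simp only [truncAGo, if_neg hc, h1, if_true]
        have h2 := ih (p ++ [t]) (count + 1)
        simp only [List.append_assoc, List.cons_append, List.nil_append] at h2
        rw [h2]
        have hm : ¬ (n - count ≤ 1) := by omega
        simp only [fTr, if_neg hm, if_true]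
        have he : n - (count + 1) = n - count - 1 := by ring
        rw [he]
    · have h1 : ((p.length : Int) + 1) = (((p ++ [t]).length : Nat) : Int) := by
        simp
      simp only [truncAGo, if_neg ht, h1]
      have h2 := ih (p ++ [t]) count
      simp only [List.append_assoc, List.cons_append, List.nil_append] at h2
      rw [h2, fTr, if_neg ht]

-- B's core, with the prefix made explicit
theorem alt_core (nl : Int) (l p : List Int) (k : Int) (hk : 1 ≤ k) :
    (let positions : List Int :=
      ((PySem.List.enumerate l (p.length : Int)).filter (fun q => q.2 == nl)).map (·.1)
     if (positions.length : Int) ≥ k then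
       PySem.List.slice (p ++ l) none (some (positions.getD (k - 1).toNat 0 + 1))
     else p ++ l)
      = p ++ fTr nl l k := by
  induction l generalizing p k with
  | nil =>
    simp only [PySem.List.enumerate, List.filter_nil, List.map_nil, List.length_nil, fTr]
    rw [if_neg (by push_cast; omega)]
  | cons t l ih =>
    rw [PySem.List.enumerate_cons]
    by_cases ht : t = nl
    · subst ht
      simp only [List.filter_cons, beq_self_eq_true, if_pos, List.map_cons]
      by_cases h1 : k = 1
      · subst h1
        rw [if_pos (by simp only [List.length_cons]; push_cast; omega)]
        simp only [show ((1 : Int) - 1).toNat = 0 from rfl, List.getD_cons_zero]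
        have hb : ((p.length : Int) + 1) = ((p.length + 1 : Nat) : Int) := by push_cast; ring
        rw [hb, PySem.List.slice_to_natCast]
        simp [fTr, List.take_append]
      · have hk2 : 2 ≤ k := by omega
        have hb : ((p.length : Int) + 1) = (((p ++ [t]).length : Nat) : Int) := by
          simp
        rw [hb]
        have h2 := ih (p ++ [t]) (k - 1) (by omega)
        simp only [List.append_assoc, List.cons_append, List.nil_append] at h2
        have hidx : (k - 1).toNat = ((k - 1) - 1).toNat + 1 := by omega
        simp only [List.length_cons, hidx, List.getD_cons_succ]
        rw [show fTr t (t :: l) k = t :: fTr t l (k - 1) by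
          simp only [fTr, if_neg (show ¬ k ≤ 1 by omega), if_true]]
        set P := (List.filter (fun q => q.2 == t) (PySem.List.enumerate l ((p ++ [t]).length : Int))).map (fun x => x.1) with hP
        have hcond : (((P.length + 1 : Nat)) : Int) ≥ k ↔ ((P.length : Nat) : Int) ≥ k - 1 := by
          push_cast; omega
        by_cases hc : ((P.length : Nat) : Int) ≥ k - 1
        · rw [if_pos (hcond.mpr hc)]
          rw [if_pos hc] at h2
          rw [h2]
        · rw [if_neg (fun h => hc (hcond.mp h))]
          rw [if_neg hc] at h2
          rw [h2]
    · have ht' : ¬ ((t == nl) = true) := by simpa using ht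
      simp only [List.filter_cons, if_neg ht']
      have hb : ((p.length : Int) + 1) = (((p ++ [t]).length : Nat) : Int) := by
        simp
      rw [hb]
      have h2 := ih (p ++ [t]) k hk
      simp only [List.append_assoc, List.cons_append, List.nil_append] at h2
      rw [h2, fTr, if_neg ht]

theorem fTr_clamp (nl : Int) (l : List Int) (n : Int) (hn : n ≤ 1) :
    fTr nl l n = fTr nl l 1 := by
  induction l with
  | nil => rfl
  | cons t l ih =>
    by_cases ht : t = nl
    · simp [fTr, ht, hn]
    · simp [fTr, ht, ih]

theorem truncate_eq_fTr (token_ids : List Int) (nl_id n : Int) :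
    truncate_to_n_newlines_py token_ids nl_id n = fTr nl_id token_ids n := by
  have := truncAGo_eq nl_id n token_ids [] 0
  simpa [truncate_to_n_newlines_py] using this

theorem alt_eq_fTr (token_ids : List Int) (nl_id n : Int) :
    truncate_to_n_newlines_py_alt token_ids nl_id n
      = fTr nl_id token_ids (if n > 1 then n else 1) := by
  have h := alt_core nl_id token_ids [] (if n > 1 then n else 1) (by split <;> omega)
  simpa [truncate_to_n_newlines_py_alt] using h

-- ===== VERDICT (by name: the statement is the Claim_ definition above) =====
theorem truncate_to_n_newlines_py_spec : Claim_equal_truncate_to_n_newlines_py := by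
  intro token_ids nl_id n _
  unfold Spec_truncate_to_n_newlines_py
  rw [truncate_eq_fTr, alt_eq_fTr]
  by_cases hn : n > 1
  · rw [if_pos hn]
  · rw [if_neg hn, fTr_clamp nl_id token_ids n (by omega)]
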